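/- GENERATED by farm/worked/mk_tree_copies.py from farm/worked/next_segment/Proof.lean (a worked proof of the farm's unit `next_segment`,
   accepted by the verdict) — do not edit. -/
import Asan.CheckWalk
import Vorbis.Spec.ReaderLemmas
import Vorbis.Spec.Units.next_segment

open X86 X86.User Asan Vorbis

set_option maxRecDepth 4000
set_option maxHeartbeats 4000000

namespace Vorbis.Spec.Worked.next_segment
open Vorbis.Spec.next_segment (Statement)

open Vorbis.Spec.Segment
/-- The windows the segment read writes, seen from its first instruction: the stack, `bytes_in_seg`, `next_seg` …
`last_seg_which`. -/
def segWins_w (sp f : Nat) : List Span := [⟨sp - 240, sp⟩, ⟨f + 1748, f + 1749⟩, ⟨f + 1752, f + 1764⟩]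

/-- Unfolds `segWins_w`. -/
theorem segWins_def_w (sp f : Nat) : segWins_w sp f = [⟨sp - 240, sp⟩, ⟨f + 1748, f + 1749⟩, ⟨f + 1752, f + 1764⟩] := id rfl

/-- A region that meets none of the windows of the segment read is unchanged by it. -/
theorem segWins_eqOn_w {sp f lo hi : Nat} {m M : Mem} (h : Mem.SameExcept (segWins_w sp f) m M)
    (h1 : hi ≤ sp - 240 ∨ sp ≤ lo) (h2 : hi ≤ f + 1748 ∨ f + 1749 ≤ lo) (h3 : hi ≤ f + 1752 ∨ f + 1764 ≤ lo) :
    Mem.EqOn lo hi m M := by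
  apply h.eqOn
  intro w hw
  simp only [segWins_def_w, List.mem_cons, List.mem_nil_iff, or_false] at hw
  rcases hw with rfl | rfl | rfl
  · exact h1
  · exact h2
  · exact h3

/-- The footprint of the contract still holds after the segment read. -/
theorem segWins_foot_w {sp f : Nat} {m0 m M : Mem}
    (h0 : Mem.SameExcept [⟨sp - 240, sp⟩, ⟨f + 48, f + 56⟩, ⟨f + 84, f + 96⟩, ⟨f + 136, f + 144⟩, ⟨f + 1484, f + 1749⟩,
      ⟨f + 1752, f + 1764⟩, ⟨f + 1776, f + 1784⟩] m0 m)
    (h : Mem.SameExcept (segWins_w sp f) m M) :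
    Mem.SameExcept [⟨sp - 240, sp⟩, ⟨f + 48, f + 56⟩, ⟨f + 84, f + 96⟩, ⟨f + 136, f + 144⟩, ⟨f + 1484, f + 1749⟩,
      ⟨f + 1752, f + 1764⟩, ⟨f + 1776, f + 1784⟩] m0 M := by
  apply h0.step_same h
  apply spans_sub
  intro w hw
  simp only [segWins_def_w, List.mem_cons, List.mem_nil_iff, or_false] at hw
  rcases hw with rfl | rfl | rfl
  · simp only [inSpans_cons, inSpans_nil, or_false]
    omega
  · simp only [inSpans_cons, inSpans_nil, or_false]
    omega
  · simp only [inSpans_cons, inSpans_nil, or_false]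
    omega

/-- **The contract's postcondition on a path through the segment read**, from what the walk knows of the returned state. -/
theorem segment_returned_w {Blk : Block → Prop} {len : Nat} {u s v : State} {sp f n c x l : Nat}
    (hb : Bits Blk len s.mem f) (hmu : mu s.mem f ≤ mu u.mem f)
    (hn : stb_vorbis.next_seg s.mem f = (n : Int)) (hc : stb_vorbis.segment_count s.mem f = (c : Int))
    (hsv : Mem.SameExcept (segWins_w sp f) s.mem v.mem)
    (hstack : sp ≤ f ∨ f + 1808 ≤ sp - 240) (hsp : sp ≤ 0x800000)
    (hns : v.mem.readLE (addr f + 1752) 4 = x) (hx : (n + 1 < c ∧ x = n + 1) ∨ (c ≤ n + 1 ∧ x = 4294967295))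
    (hbs : v.mem.readLE (addr f + 1748) 1 = l) (hl : l < 256)
    (hun : ShadowUntouched u.mem s.mem) (hrax : v.reg .rax = addr l) (hlast : stb_vorbis.last_seg u.mem f = 0) :
    NextSegmentPost Blk len f u v := by
  have hr := hb.OBR
  simp only [voff] at hr
  have hE1 : Mem.EqOn (f + 48) (f + 72) s.mem v.mem := segWins_eqOn_w hsv (by omega) (by omega) (by omega)
  have hE2 : Mem.EqOn (f + 1488) (f + 1492) s.mem v.mem := segWins_eqOn_w hsv (by omega) (by omega) (by omega)
  have hE3 : Mem.EqOn (f + 1768) (f + 1772) s.mem v.mem := segWins_eqOn_w hsv (by omega) (by omega) (by omega)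
  have hE4 : Mem.EqOn 0xC00000 0xE00000 s.mem v.mem := segWins_eqOn_w hsv (by omega) (by omega) (by omega)
  obtain ⟨hbits, hlt, hbytes⟩ := segment_post hb hmu hn hc hE1 hE2 hE3 hns hx hbs hl
  have erax : (v.reg .rax).toNat = l := by
    rw [hrax]
    exact toNat_addr l (by omega)
  constructor
  · exact Mem.EqOn.trans hun hE4
  · exact ⟨hbits, Nat.le_of_lt hlt⟩
  · omega
  · intro hne
    exact absurd hlast hne
  · intro _
    exact ⟨by omega, hlt⟩
  · intro h0 _
    rw [h0] at erax
    rw [hbytes, ← erax]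
    rfl

set_option maxHeartbeats 16000000 in
theorem segment_read_w (Lay : Layout) (hLay : Lay.hi = 0x1000000) (μ : Microarch) (hμ : UserX.MicroOK μ) (u₀ : State)
    (hcode : HasCodeNat Lay u₀ Vorbis.L.next_segment.entry Vorbis.Code.code_next_segment.nat Vorbis.L.next_segment.size)
    (hload4 : Asan.SmallCheck Lay μ Vorbis.WayInv (Vorbis.CodeOK u₀) [.rax, .rcx, .rdx] 4 Vorbis.L.__asan_load4_noabort.entry)
    (hload1 : Asan.SmallCheck Lay μ Vorbis.WayInv (Vorbis.CodeOK u₀) [.rax, .rdx] 1 Vorbis.L.__asan_load1_noabort.entry)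
    (hstore4 : Asan.SmallCheck Lay μ Vorbis.WayInv (Vorbis.CodeOK u₀) [.rax, .rcx, .rdx] 4 Vorbis.L.__asan_store4_noabort.entry)
    (hstore1 : Asan.SmallCheck Lay μ Vorbis.WayInv (Vorbis.CodeOK u₀) [.rax, .rdx] 1 Vorbis.L.__asan_store1_noabort.entry)
    (others : List Obj) (frames : List (Nat × FrameLayout)) (Blk : Block → Prop) (len : Nat) (u s : State) (ret : Word) (f : Nat)
    (hpre : ReaderPre others frames Blk len u) (hf : (u.reg .rdi).toNat = f)
    (he_ret_lt : ret < 1073741824)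
    (he_stack : Lay.Has (u.reg Reg.rsp - 240) 248)
    (he_room : 7340032 + 240 ≤ (u.reg Reg.rsp).toNat)
    (hlast : stb_vorbis.last_seg u.mem f = 0)
    (hrip : s.rip = Vorbis.L.next_segment.entry + 61)
    (hrbx : s.reg .rbx = addr f)
    (hrsp : s.reg .rsp = u.reg .rsp - 40)
    (hkept : RegsKept [Reg.rbp, Reg.rdi, Reg.rbx, Reg.rsp, Reg.rax, Reg.rcx, Reg.rdx, Reg.rsi, Reg.r8, Reg.r9, Reg.r10, Reg.r11,
      Reg.r16, Reg.r17, Reg.r18, Reg.r19, Reg.r20, Reg.r21, Reg.r22, Reg.r23, Reg.r24, Reg.r25, Reg.r26, Reg.r27, Reg.r28,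
      Reg.r29, Reg.r30, Reg.r31] u s)
    (hsame : Mem.SameExcept [⟨(u.reg .rsp).toNat - 240, (u.reg .rsp).toNat⟩,
      ⟨f + 48, f + 56⟩, ⟨f + 84, f + 96⟩, ⟨f + 136, f + 144⟩, ⟨f + 1484, f + 1749⟩, ⟨f + 1752, f + 1764⟩,
      ⟨f + 1776, f + 1784⟩] u.mem s.mem)
    (hun : ShadowUntouched u.mem s.mem)
    (hs1 : UInt64.ofNat (s.mem.readLE (u.reg .rsp - 8) 8) = u.reg .r14)
    (hs2 : UInt64.ofNat (s.mem.readLE (u.reg .rsp - 16) 8) = u.reg .r13)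
    (hs3 : UInt64.ofNat (s.mem.readLE (u.reg .rsp - 24) 8) = u.reg .r12)
    (hs4 : UInt64.ofNat (s.mem.readLE (u.reg .rsp - 32) 8) = u.reg .rbp)
    (hs5 : UInt64.ofNat (s.mem.readLE (u.reg .rsp - 40) 8) = u.reg .rbx)
    (hs0 : UInt64.ofNat (s.mem.readLE (u.reg .rsp) 8) = ret)
    (heq : Mem.EqOn Vorbis.L.textLo Vorbis.L.textHi u₀.mem s.mem)
    (hdf : s.flags .df = false) (hmx : s.mxcsr &&& 0x1F80 = 0x1F80)
    (hb : Bits Blk len s.mem f) (hne : stb_vorbis.next_seg s.mem f ≠ -1)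
    (hmu : mu s.mem f ≤ mu u.mem f) :
    ReachVia Lay μ Vorbis.WayInv s (Returned (Vorbis.conv u₀) (Vorbis.Spec.next_segment.spec others frames Blk len) u ret) := by
  have hsp := hpre.shadow.rsp
  have hwhere := hpre.where_obj
  rw [hf] at hwhere
  have hL : BlkLive Blk (Live (stackObjs frames ++ others)) := hpre.env.live
  have hobr := hb.OBR
  simp only [voff] at hobr
  have hidx := hb.next_seg_index hne
  have hN1 := hb.N1
  have hfa : (addr f).toNat = f := toNat_addr f (by omega)
  -- the index `next_seg`, as a number
  obtain ⟨n, hn⟩ : ∃ n : Nat, stb_vorbis.next_seg s.mem f = (n : Int) := ⟨(stb_vorbis.next_seg s.mem f).toNat, by omega⟩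
  have hn254 : n ≤ 254 := by omega
  have r1752 : s.mem.readLE (addr f + 1752) 4 = n := by
    have hc := s.mem.i32_cases (f + 1752)
    simp only [vacc, voff] at hn
    simp only [vfield]
    omega
  have hna : (addr n).toNat = n := toNat_addr n (by omega)
  -- `segment_count`, as a number
  obtain ⟨c, hc⟩ : ∃ c : Nat, stb_vorbis.segment_count s.mem f = (c : Int) :=
    ⟨(stb_vorbis.segment_count s.mem f).toNat, by omega⟩
  have hc255 : c ≤ 255 := by omega
  have r1488 : s.mem.readLE (addr f + 1488) 4 = c := by
    have hcs := s.mem.i32_cases (f + 1488)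
    simp only [vacc, voff] at hc
    simp only [vfield]
    omega
  have hsx := sx_ofNat32 n (by omega)
  have h32 := ofBV_ofNat32 n (by omega)
  have hpart := part32_addr n (by omega)
  have h14 := setWidth_succ n (by omega)
  -- the lacing value `segments[next_seg]`, as a number
  obtain ⟨l, hl⟩ : ∃ l : Nat, s.mem.readLE (addr f + addr n + 1492) 1 = l := ⟨_, rfl⟩
  have hl256 : l < 256 := by
    rw [← hl]
    exact X86.User.Mem.readLE_lt s.mem _ 1
  have hz8 := zx8_ofNat l hl256
  have hw8 := low8_ofNat l hl256
  have h32l := ofBV_ofNat32 l (by omega)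
  have hp8 := part8_addr l hl256
  have hpartl := part32_addr l (by omega)
  have hl8 : (BitVec.ofNat 8 l).toNat = l := by
    rw [BitVec.toNat_ofNat]
    omega
  u_walk hcode [hμ.vendor, hsx, h32, hpart, h14, hz8, hw8, h32l, hp8, hpartl] span [Vorbis.L.textLo, Vorbis.L.textHi] side (v_side)
  case check_10ccdb =>
    -- 0x10ccdb, load1 `segments[next_seg]`: N1, N2 and `next_seg ≠ −1` make it an index of `segments[255]`
    have hun : ShadowUntouched u.mem s_10ccdb.mem := by v_untouched
    have hs := hb.site_segment hL n (by omega) (a := f + n + 1492) (by simp only [voff]; omega)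
    exact Vorbis.Spec.check_site hpre.shadow.inv hun hs (by u_omega)
  all_goals first
    | -- 0x10cd19, load4 `f->segment_count`
      exact Vorbis.Spec.check_site hpre.shadow.inv (by v_untouched)
        (hb.site_field hL 1488 4 (by omega) (by omega) rfl) (by u_omega)
    | -- 0x10cd38, store1 `f->bytes_in_seg`
      exact Vorbis.Spec.check_site hpre.shadow.inv (by v_untouched)
        (hb.site_field hL 1748 1 (by omega) (by omega) rfl) (by u_omega)
    | -- 0x10cd06, store4 `f->last_seg_which`
      exact Vorbis.Spec.check_site hpre.shadow.inv (by v_untouched)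
        (hb.site_field hL 1760 4 (by omega) (by omega) rfl) (by u_omega)
    | skip
  all_goals
    -- a path to the `ret`: the contract's `Returned`
    rw [toInt_small (n + 1) (by omega), toInt_small c (by omega)] at hbr_10cd25
    have hns : ∃ x, s_10cd4e.mem.readLE (addr f + 1752) 4 = x ∧
        ((n + 1 < c ∧ x = n + 1) ∨ (c ≤ n + 1 ∧ x = 4294967295)) := by
      first
        | exact ⟨4294967295, by u_read, Or.inr ⟨by omega, rfl⟩⟩
        | exact ⟨(BitVec.ofNat 32 (n + 1)).toNat, by u_read, Or.inl ⟨by omega, by rw [BitVec.toNat_ofNat]; omega⟩⟩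
    obtain ⟨x, hns, hx⟩ := hns
    have hbs : s_10cd4e.mem.readLE (addr f + 1748) 1 = l := by u_read
    have hsv : Mem.SameExcept (segWins_w (u.reg .rsp).toNat f) s.mem s_10cd4e.mem := by
      rw [segWins_def_w]
      u_same
    refine ReachVia.done ?_
    refine X86.User.Returned.mk w_rip w_rsp ?_ ?_ (Vorbis.conv_code_in w_eq) ?_ ?_
    · u_saved
    · simp only [X86.User.Spec.footprint, vspec, hf]
      exact segWins_foot_w hsame hsv
    · v_inv
    · show NextSegmentPost Blk len (u.reg .rdi).toNat u s_10cd4e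
      rw [hf]
      exact segment_returned_w hb hmu hn hc hsv (by omega) (by omega) hns hx hbs hl256 hun w_rax hlast



/-- **A contract that also hands back what the caller knew of the callee's entry state** (`Q`: the values of `rdi`, `rsp` at the
`call`). The walker forgets the registers of the state at the callee's entry, but the callee's footprint and postcondition are
stated in terms of them. -/
def pin_w (s : Spec) (Q : State → Prop) : Spec where
  pre u := s.pre u ∧ Q u
  post u v := s.post u v ∧ Q u
  frame := s.frame
  writes := s.writes

/-- The frame of a pinned contract. -/
theorem pin_frame_w (s : Spec) (Q : State → Prop) : (pin_w s Q).frame = s.frame := id rfl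

/-- The windows of a pinned contract. -/
theorem pin_writes_w (s : Spec) (Q : State → Prop) (u : State) : (pin_w s Q).writes u = s.writes u := id rfl

/-- A contract gives the pinned contract. -/
theorem calls_pin_w {Lay : Layout} {μ : Microarch} {I : State → Prop} {K : Conv} {entry : Word} {s : Spec}
    (hc : Calls Lay μ I K entry s) (Q : State → Prop) : Calls Lay μ I K entry (pin_w s Q) := by
  apply hc.weaken
  · intro u h
    exact h.1
  · intro u v hp hq
    exact ⟨hq, hp.2⟩
  · exact Nat.le_refl _
  · intro u _ w hw a h1 h2
    exact ⟨w, List.mem_cons_of_mem _ hw, h1, h2⟩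

/-- The join of the two ways into the segment read, `len = f->segments[f->next_seg++]` (0x10ccbd; Vorbis/Labels.lean has no
label for it). -/
abbrev segReadAt_w : Nat := Vorbis.L.next_segment.entry.toNat + 61

end Vorbis.Spec.Worked.next_segment

open Vorbis.Spec Vorbis.Spec.Segment

set_option maxHeartbeats 16000000

/-- `next_segment(f)` satisfies its contract: the two early exits (`last_seg`, the page boundary with `start_page` and the
`error(f, 32)` arm), and the read of the next lacing value from the join `Vorbis.L.next_segment.join1` (= `segReadAt_w`), which is
walked ONCE as the lemma `segment_read_w` and used from both ways in. The callees' contracts are pinned to the entry state's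
registers by `calls_pin_w`. -/
theorem Vorbis.Spec.Worked.next_segment_ok : Vorbis.Spec.next_segment.Statement := by
  intro Lay hLay μ hμ u₀ hcode hload4 hload1 hstore4 hstore1 h_start_page h_error others frames Blk len u ret he hpre
  v_entry he
  -- the contracts of the two callees, handing back the values of `rdi` and `rsp` at the `call`
  have hsp_call := Vorbis.Spec.Worked.next_segment.calls_pin_w (h_start_page others frames Blk len)
    (fun t => t.reg .rdi = u.reg .rdi ∧ t.reg .rsp = u.reg .rsp - 48)
  have herr_call := Vorbis.Spec.Worked.next_segment.calls_pin_w (h_error others frames)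
    (fun t => t.reg .rdi = u.reg .rdi ∧ t.reg .rsp = u.reg .rsp - 48)
  have hsp := hpre.shadow.rsp
  have hwhere := hpre.where_obj
  -- `f`, the object's address as a number
  obtain ⟨f, hf⟩ : ∃ f : Nat, (u.reg .rdi).toNat = f := ⟨_, rfl⟩
  have hr : u.reg .rdi = addr f := eq_addr _ _ hf
  rw [hf] at hwhere
  have hbits : Bits Blk len u.mem f := hf ▸ hpre.bits
  have hL : BlkLive Blk (Live (stackObjs frames ++ others)) := hpre.env.live
  have hobr := hbits.OBR
  simp only [voff] at hobr
  have hfa : (addr f).toNat = f := toNat_addr f (by omega)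
  -- `next_seg` and `last_seg` of the entry memory, from the bytes the two compares read
  have hns_u := next_seg_of_read u.mem f _ rfl
  have hls_u := last_seg_of_read u.mem f _ rfl
  have hlt1 : u.mem.readLE (addr f + 1752) 4 < 4294967296 := X86.User.Mem.readLE_lt u.mem _ 4
  have hlt2 : u.mem.readLE (addr f + 1756) 4 < 4294967296 := X86.User.Mem.readLE_lt u.mem _ 4
  have hc1 := sint32_cases (u.mem.readLE (addr f + 1752) 4)
  have hc2 := sint32_cases (u.mem.readLE (addr f + 1756) 4)
  u_walk hcode [hμ.vendor] until [Vorbis.Spec.Worked.next_segment.segReadAt_w] span [Vorbis.L.textLo, Vorbis.L.textHi] side (first | v_side | (simp only [Vorbis.Spec.Worked.next_segment.pin_frame_w, vspec, Vorbis.conv_stackLo, Vorbis.conv_stackHi, Vorbis.conv_inv] <;> u_omega))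
  case check_10cc92 =>
    -- 0x10cc92, load4 `f->last_seg`
    exact Vorbis.Spec.check_site hpre.shadow.inv (by v_untouched)
      (hbits.site_field hL 1756 4 (by omega) (by omega) rfl) (by u_omega)
  case check_10ccab =>
    -- 0x10ccab, load4 `f->next_seg`
    exact Vorbis.Spec.check_site hpre.shadow.inv (by v_untouched)
      (hbits.site_field hL 1752 4 (by omega) (by omega) rfl) (by u_omega)
  case check_10cd56 =>
    -- 0x10cd56, load4 `f->segment_count`
    exact Vorbis.Spec.check_site hpre.shadow.inv (by v_untouched)
      (hbits.site_field hL 1488 4 (by omega) (by omega) rfl) (by u_omega)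
  case check_10cd6b =>
    -- 0x10cd6b, store4 `f->last_seg_which`
    exact Vorbis.Spec.check_site hpre.shadow.inv (by v_untouched)
      (hbits.site_field hL 1760 4 (by omega) (by omega) rfl) (by u_omega)
  case call_inv => v_inv
  case pre_10cd79 =>
    -- start_page's precondition: `Bits` over the pushes and the store of `last_seg_which`; `next_seg = −1`
    have hsame0 : Mem.SameExcept [⟨(u.reg .rsp).toNat - 240, (u.reg .rsp).toNat⟩, ⟨f + 1760, f + 1764⟩] u.mem
        s_10cd79.mem := by
      u_same
    have hk := kept_of_sameExcept hbits hsame0 (by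
      intro w hw
      simp only [List.mem_cons, List.mem_nil_iff, or_false] at hw
      rcases hw with rfl | rfl
      · simp only []
        omega
      · simp only []
        omega)
    have hrdi : s_10cd79.reg .rdi = u.reg .rdi := by
      rw [w_rdi, hr]
    have hun : ShadowUntouched u.mem s_10cd79.mem := by v_untouched
    refine ⟨⟨hpre.again (hpre.shadow.call hun (by u_omega) (by u_omega) (by u_omega)) hrdi ?_, ?_⟩, hrdi, w_rsp⟩
    · rw [hf]
      exact hk.1
    · show AtPageBoundary s_10cd79.mem (s_10cd79.reg .rdi).toNat
      rw [hrdi, hf]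
      left
      rw [hk.2.2.1, hns_u]
      omega
  · -- `last_seg ≠ 0` on entry: nothing but the pushes and pops, eax = 0
    have hsame0 : Mem.SameExcept [⟨(u.reg .rsp).toNat - 240, (u.reg .rsp).toNat⟩] u.mem s_10cd4e.mem := by
      u_same
    have hk := kept_of_sameExcept hbits hsame0 (by
      intro w hw
      simp only [List.mem_cons, List.mem_nil_iff, or_false] at hw
      subst hw
      simp only []
      omega)
    refine ReachVia.done ?_
    refine X86.User.Returned.mk w_rip w_rsp ?_ ?_ (Vorbis.conv_code_in w_eq) ?_ ?_
    · u_saved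
    · simp only [X86.User.Spec.footprint, vspec, hf]
      u_same
    · v_inv
    · show NextSegmentPost Blk len (u.reg .rdi).toNat u s_10cd4e
      rw [hf]
      have e0 : s_10cd4e.reg .rax = 0 := w_rax.trans (by decide)
      constructor
      · v_untouched
      · exact ⟨hk.1, Nat.le_of_eq hk.2.1⟩
      · rw [e0]
        decide
      · intro _
        exact e0
      · intro hne
        exact absurd e0 hne
      · intro _ h0
        rw [hk.2.2.2]
        exact h0
  · -- after start_page (0x10cd7e): its footprint and postcondition in numbers
    have w_eq := Vorbis.conv_code_eqOn w_code
    obtain ⟨hpost, hqrdi, hqrsp⟩ := w_post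
    have e48 : (u.reg .rsp - 48).toNat = (u.reg .rsp).toNat - 48 := by u_omega
    simp only [X86.User.Spec.footprint, Vorbis.Spec.Worked.next_segment.pin_frame_w, Vorbis.Spec.Worked.next_segment.pin_writes_w, vspec, hqrdi, hqrsp, hf, e48] at w_same
    have hpost' : StartPagePost Blk len f s_10cd79 s_10cd79r := by
      have h := hpost
      simp only [start_page.spec, hqrdi, hf] at h
      exact h
    clear hpost
    -- the function's own stores before the call
    have hsame0 : Mem.SameExcept [⟨(u.reg .rsp).toNat - 240, (u.reg .rsp).toNat⟩, ⟨f + 1760, f + 1764⟩] u.mem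
        s_10cd79.mem := by
      u_same
    have hk := kept_of_sameExcept hbits hsame0 (by
      intro w hw
      simp only [List.mem_cons, List.mem_nil_iff, or_false] at hw
      rcases hw with rfl | rfl
      · simp only []
        omega
      · simp only []
        omega)
    -- the saved registers' slots, at the call and through the callee's footprint
    have hp1 : UInt64.ofNat (s_10cd79.mem.readLE (u.reg .rsp - 8) 8) = u.reg .r14 := by u_resolve
    have hp2 : UInt64.ofNat (s_10cd79.mem.readLE (u.reg .rsp - 16) 8) = u.reg .r13 := by u_resolve
    have hp3 : UInt64.ofNat (s_10cd79.mem.readLE (u.reg .rsp - 24) 8) = u.reg .r12 := by u_resolve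
    have hp4 : UInt64.ofNat (s_10cd79.mem.readLE (u.reg .rsp - 32) 8) = u.reg .rbp := by u_resolve
    have hp5 : UInt64.ofNat (s_10cd79.mem.readLE (u.reg .rsp - 40) 8) = u.reg .rbx := by u_resolve
    have hp0 : UInt64.ofNat (s_10cd79.mem.readLE (u.reg .rsp) 8) = ret := by u_resolve
    have hs1 : UInt64.ofNat (s_10cd79r.mem.readLE (u.reg .rsp - 8) 8) = u.reg .r14 := by u_frame hp1
    have hs2 : UInt64.ofNat (s_10cd79r.mem.readLE (u.reg .rsp - 16) 8) = u.reg .r13 := by u_frame hp2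
    have hs3 : UInt64.ofNat (s_10cd79r.mem.readLE (u.reg .rsp - 24) 8) = u.reg .r12 := by u_frame hp3
    have hs4 : UInt64.ofNat (s_10cd79r.mem.readLE (u.reg .rsp - 32) 8) = u.reg .rbp := by u_frame hp4
    have hs5 : UInt64.ofNat (s_10cd79r.mem.readLE (u.reg .rsp - 40) 8) = u.reg .rbx := by u_frame hp5
    have hs0 : UInt64.ofNat (s_10cd79r.mem.readLE (u.reg .rsp) 8) = ret := by u_frame hp0
    clear hp1 hp2 hp3 hp4 hp5 hp0
    -- what start_page left of `Bits`, μ and `bytes_in_seg`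
    have hbr : Bits Blk len s_10cd79r.mem f := hpost'.reader.bits
    have hmu_r : mu s_10cd79r.mem f ≤ mu u.mem f := by
      have h := hpost'.reader.mu_le
      rw [hk.2.1] at h
      exact h
    have hbytes_r : stb_vorbis.bytes_in_seg s_10cd79r.mem f = stb_vorbis.bytes_in_seg u.mem f := by
      rw [← hk.2.2.2]
      apply bytes_in_seg_of_sameExcept (by omega) w_same
      simp only [List.forall_mem_cons, List.not_mem_nil, false_imp_iff, implies_true, and_true]
      omega
    have hdf_r : s_10cd79r.flags .df = false := (show X86.User.abiInv _ from w_inv).1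
    have hmx_r : s_10cd79r.mxcsr &&& 0x1F80 = 0x1F80 := (show X86.User.abiInv _ from w_inv).2
    -- the contract's footprint so far
    have hfoot0 : Mem.SameExcept [⟨(u.reg .rsp).toNat - 240, (u.reg .rsp).toNat⟩,
        ⟨f + 48, f + 56⟩, ⟨f + 84, f + 96⟩, ⟨f + 136, f + 144⟩, ⟨f + 1484, f + 1749⟩, ⟨f + 1752, f + 1764⟩,
        ⟨f + 1776, f + 1784⟩] u.mem s_10cd79.mem := by
      u_same
    have hfoot : Mem.SameExcept [⟨(u.reg .rsp).toNat - 240, (u.reg .rsp).toNat⟩,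
        ⟨f + 48, f + 56⟩, ⟨f + 84, f + 96⟩, ⟨f + 136, f + 144⟩, ⟨f + 1484, f + 1749⟩, ⟨f + 1752, f + 1764⟩,
        ⟨f + 1776, f + 1784⟩] u.mem s_10cd79r.mem := by
      apply hfoot0.step_same w_same
      apply spans_sub
      simp only [List.forall_mem_cons, List.not_mem_nil, false_imp_iff, implies_true, and_true, inSpans_cons, inSpans_nil,
        or_false]
      omega
    clear w_same hfoot0 hsame0 w_mem_10cd79
    have hlast : stb_vorbis.last_seg u.mem f = 0 := by
      rw [hls_u]
      omega
    -- start_page's result, named (the walker keeps no fact about the returned `rax` otherwise)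
    obtain ⟨r, hrax⟩ : ∃ r : Word, s_10cd79r.reg .rax = r := ⟨_, rfl⟩
    have hres : r = 0 ∨ r = 1 := by
      rw [← hrax]
      exact hpost'.result
    have htest := rax_of_test r hres
    u_walk hcode [hμ.vendor] until [Vorbis.Spec.Worked.next_segment.segReadAt_w] span [Vorbis.L.textLo, Vorbis.L.textHi] side (first | v_side | (simp only [Vorbis.Spec.Worked.next_segment.pin_frame_w, vspec, Vorbis.conv_stackLo, Vorbis.conv_stackHi, Vorbis.conv_inv] <;> u_omega))
    case check_10cdb5 =>
      -- 0x10cdb5, store4 `f->last_seg`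
      exact Vorbis.Spec.check_site hpre.shadow.inv (by v_untouched)
        (hbits.site_field hL 1756 4 (by omega) (by omega) rfl) (by u_omega)
    case check_10cd8b =>
      -- 0x10cd8b, load1 `f->page_flag`
      exact Vorbis.Spec.check_site hpre.shadow.inv (by v_untouched)
        (hbits.site_field hL 1747 1 (by omega) (by omega) rfl) (by u_omega)
    case call_inv => v_inv
    case pre_10cda5 =>
      -- error's precondition: the shadow clause and `*f` inside one live object
      have hobj := hpre.env.obj
      rw [hf] at hobj
      refine ⟨⟨hpre.shadow.call (by v_untouched) (by u_omega) (by u_omega) (by u_omega), ?_⟩, ?_, w_rsp⟩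
      · rw [w_rdi, hfa]
        exact hobj
      · rw [w_rdi, hr]
    · -- start_page returned 0: `f->last_seg = 1; return 0`
      have hr0 : r = 0 := htest.1 hbr_10cd82
      have hsameF : Mem.SameExcept [⟨(u.reg .rsp).toNat - 240, (u.reg .rsp).toNat⟩, ⟨f + 1756, f + 1760⟩]
          s_10cd79r.mem s_10cd4e.mem := by
        u_same
      have hkF := kept_of_sameExcept hbr hsameF (by
        intro w hw
        simp only [List.mem_cons, List.mem_nil_iff, or_false] at hw
        rcases hw with rfl | rfl
        · simp only []
          omega
        · simp only []
          omega)
      refine ReachVia.done ?_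
      refine X86.User.Returned.mk w_rip w_rsp ?_ ?_ (Vorbis.conv_code_in w_eq) ?_ ?_
      · u_saved
      · simp only [X86.User.Spec.footprint, vspec, hf]
        u_same
      · v_inv
      · show NextSegmentPost Blk len (u.reg .rdi).toNat u s_10cd4e
        rw [hf]
        have e0 : s_10cd4e.reg .rax = 0 := by
          rw [w_rax, hr0]
          exact ofBV_part32_zero
        constructor
        · v_untouched
        · refine ⟨hkF.1, ?_⟩
          rw [hkF.2.1]
          exact hmu_r
        · rw [e0]
          decide
        · intro _
          exact e0
        · intro hne
          exact absurd e0 hne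
        · intro _ h0
          rw [hkF.2.2.2, hbytes_r]
          exact h0
    · -- start_page returned 1 and the continued-packet flag is set: the segment read, from `next_seg = 0`
      have hr1 : r = 1 := htest.2 hbr_10cd82
      have hstarted := hpost'.started (hrax.trans hr1)
      have hsame : Mem.SameExcept [⟨(u.reg .rsp).toNat - 240, (u.reg .rsp).toNat⟩,
          ⟨f + 48, f + 56⟩, ⟨f + 84, f + 96⟩, ⟨f + 136, f + 144⟩, ⟨f + 1484, f + 1749⟩, ⟨f + 1752, f + 1764⟩,
          ⟨f + 1776, f + 1784⟩] u.mem s_10cd97.mem := by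
        u_same
      have hsame1 : Mem.SameExcept [⟨(u.reg .rsp).toNat - 240, (u.reg .rsp).toNat⟩] s_10cd79r.mem s_10cd97.mem := by
        u_same
      have hk1 := kept_of_sameExcept hbr hsame1 (by
        intro w hw
        simp only [List.mem_cons, List.mem_nil_iff, or_false] at hw
        subst hw
        simp only []
        omega)
      have hun : ShadowUntouched u.mem s_10cd97.mem := by v_untouched
      have ht1 : UInt64.ofNat (s_10cd97.mem.readLE (u.reg .rsp - 8) 8) = u.reg .r14 := by u_frame hs1
      have ht2 : UInt64.ofNat (s_10cd97.mem.readLE (u.reg .rsp - 16) 8) = u.reg .r13 := by u_frame hs2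
      have ht3 : UInt64.ofNat (s_10cd97.mem.readLE (u.reg .rsp - 24) 8) = u.reg .r12 := by u_frame hs3
      have ht4 : UInt64.ofNat (s_10cd97.mem.readLE (u.reg .rsp - 32) 8) = u.reg .rbp := by u_frame hs4
      have ht5 : UInt64.ofNat (s_10cd97.mem.readLE (u.reg .rsp - 40) 8) = u.reg .rbx := by u_frame hs5
      have ht0 : UInt64.ofNat (s_10cd97.mem.readLE (u.reg .rsp) 8) = ret := by u_frame hs0
      have hdf : s_10cd97.flags .df = false := by
        rw [w_flags]
        simp only [X86.User.df_setStatus]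
        exact w_df_10cd8b
      have hmx : s_10cd97.mxcsr &&& 0x1F80 = 0x1F80 := by
        rw [w_mxcsr]
        exact hmx_r
      have hne : stb_vorbis.next_seg s_10cd97.mem f ≠ -1 := by
        rw [hk1.2.2.1, hstarted.1]
        decide
      have hmu1 : mu s_10cd97.mem f ≤ mu u.mem f := by
        rw [hk1.2.1]
        exact hmu_r
      exact Vorbis.Spec.Worked.next_segment.segment_read_w Lay hLay μ hμ u₀ hcode hload4 hload1 hstore4 hstore1 others frames Blk len u s_10cd97 ret f hpre hf
        he_ret_lt he_stack he_room hlast (w_rip.trans (by rfl)) w_rbx w_rsp (w_kept.mono_all (by rfl)) hsame hun ht1 ht2 ht3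
        ht4 ht5 ht0 w_eq hdf hmx hk1.1 hne hmu1
    · -- the flag is clear: `return error(f, VORBIS_continued_packet_flag_invalid)` (0x10cdaa)
      have w_eq := Vorbis.conv_code_eqOn w_code
      obtain ⟨⟨hraxE, _, _⟩, hqrdi2, hqrsp2⟩ := w_post
      simp only [X86.User.Spec.footprint, Vorbis.Spec.Worked.next_segment.pin_frame_w, Vorbis.Spec.Worked.next_segment.pin_writes_w, vspec, hqrdi2, hqrsp2, hf, e48] at w_same
      -- the saved registers' slots, at the call and through error's footprint
      have hq1 : UInt64.ofNat (s_10cda5.mem.readLE (u.reg .rsp - 8) 8) = u.reg .r14 := by u_frame hs1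
      have hq2 : UInt64.ofNat (s_10cda5.mem.readLE (u.reg .rsp - 16) 8) = u.reg .r13 := by u_frame hs2
      have hq3 : UInt64.ofNat (s_10cda5.mem.readLE (u.reg .rsp - 24) 8) = u.reg .r12 := by u_frame hs3
      have hq4 : UInt64.ofNat (s_10cda5.mem.readLE (u.reg .rsp - 32) 8) = u.reg .rbp := by u_frame hs4
      have hq5 : UInt64.ofNat (s_10cda5.mem.readLE (u.reg .rsp - 40) 8) = u.reg .rbx := by u_frame hs5
      have hq0 : UInt64.ofNat (s_10cda5.mem.readLE (u.reg .rsp) 8) = ret := by u_frame hs0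
      have he1 : UInt64.ofNat (s_10cda5r.mem.readLE (u.reg .rsp - 8) 8) = u.reg .r14 := by u_frame hq1
      have he2 : UInt64.ofNat (s_10cda5r.mem.readLE (u.reg .rsp - 16) 8) = u.reg .r13 := by u_frame hq2
      have he3 : UInt64.ofNat (s_10cda5r.mem.readLE (u.reg .rsp - 24) 8) = u.reg .r12 := by u_frame hq3
      have he4 : UInt64.ofNat (s_10cda5r.mem.readLE (u.reg .rsp - 32) 8) = u.reg .rbp := by u_frame hq4
      have he5 : UInt64.ofNat (s_10cda5r.mem.readLE (u.reg .rsp - 40) 8) = u.reg .rbx := by u_frame hq5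
      have he0 : UInt64.ofNat (s_10cda5r.mem.readLE (u.reg .rsp) 8) = ret := by u_frame hq0
      clear hq1 hq2 hq3 hq4 hq5 hq0
      -- the contract's footprint, and what `Bits` and μ read, through error's footprint
      have hfootE0 : Mem.SameExcept [⟨(u.reg .rsp).toNat - 240, (u.reg .rsp).toNat⟩,
          ⟨f + 48, f + 56⟩, ⟨f + 84, f + 96⟩, ⟨f + 136, f + 144⟩, ⟨f + 1484, f + 1749⟩, ⟨f + 1752, f + 1764⟩,
          ⟨f + 1776, f + 1784⟩] u.mem s_10cda5.mem := by
        u_same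
      have hfootE : Mem.SameExcept [⟨(u.reg .rsp).toNat - 240, (u.reg .rsp).toNat⟩,
          ⟨f + 48, f + 56⟩, ⟨f + 84, f + 96⟩, ⟨f + 136, f + 144⟩, ⟨f + 1484, f + 1749⟩, ⟨f + 1752, f + 1764⟩,
          ⟨f + 1776, f + 1784⟩] u.mem s_10cda5r.mem := by
        apply hfootE0.step_same w_same
        apply spans_sub
        simp only [List.forall_mem_cons, List.not_mem_nil, false_imp_iff, implies_true, and_true, inSpans_cons, inSpans_nil,
          or_false]
        omega
      have hsameE0 : Mem.SameExcept [⟨(u.reg .rsp).toNat - 240, (u.reg .rsp).toNat⟩, ⟨f + 136, f + 144⟩] s_10cd79r.mem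
          s_10cda5.mem := by
        u_same
      have hsameE : Mem.SameExcept [⟨(u.reg .rsp).toNat - 240, (u.reg .rsp).toNat⟩, ⟨f + 136, f + 144⟩] s_10cd79r.mem
          s_10cda5r.mem := by
        apply hsameE0.step_same w_same
        apply spans_sub
        simp only [List.forall_mem_cons, List.not_mem_nil, false_imp_iff, implies_true, and_true, inSpans_cons, inSpans_nil,
          or_false]
        omega
      have hkE := kept_of_sameExcept hbr hsameE (by
        intro w hw
        simp only [List.mem_cons, List.mem_nil_iff, or_false] at hw
        rcases hw with rfl | rfl
        · simp only []
          omega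
        · simp only []
          omega)
      have hdf_e : s_10cda5r.flags .df = false := (show X86.User.abiInv _ from w_inv).1
      have hmx_e : s_10cda5r.mxcsr &&& 0x1F80 = 0x1F80 := (show X86.User.abiInv _ from w_inv).2
      have hunE : ShadowUntouched u.mem s_10cda5r.mem := by
        unfold Asan.ShadowUntouched
        apply hfootE.eqOn
        simp only [List.forall_mem_cons, List.not_mem_nil, false_imp_iff, implies_true, and_true]
        omega
      clear w_same hfootE0 hsameE0 hsameE w_mem_10cda5 hfoot
      u_walk hcode [hμ.vendor] span [Vorbis.L.textLo, Vorbis.L.textHi] side (v_side)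
      refine ReachVia.done ?_
      refine X86.User.Returned.mk w_rip w_rsp ?_ ?_ (Vorbis.conv_code_in w_eq) ?_ ?_
      · u_saved
      · simp only [X86.User.Spec.footprint, vspec, hf]
        u_same
      · v_inv
      · show NextSegmentPost Blk len (u.reg .rdi).toNat u s_10cd4e
        rw [hf]
        have e0 : s_10cd4e.reg .rax = 0 := w_rax.trans ofBV_part32_zero
        constructor
        · rw [w_mem]
          exact hunE
        · rw [w_mem]
          refine ⟨hkE.1, ?_⟩
          rw [hkE.2.1]
          exact hmu_r
        · rw [e0]
          decide
        · intro _
          exact e0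
        · intro hne
          exact absurd e0 hne
        · intro _ h0
          rw [w_mem, hkE.2.2.2, hbytes_r]
          exact h0
  · -- `next_seg ≠ −1` on entry: the segment read
    have hsame : Mem.SameExcept [⟨(u.reg .rsp).toNat - 240, (u.reg .rsp).toNat⟩,
        ⟨f + 48, f + 56⟩, ⟨f + 84, f + 96⟩, ⟨f + 136, f + 144⟩, ⟨f + 1484, f + 1749⟩, ⟨f + 1752, f + 1764⟩,
        ⟨f + 1776, f + 1784⟩] u.mem s_10ccb7.mem := by
      u_same
    have hsame0 : Mem.SameExcept [⟨(u.reg .rsp).toNat - 240, (u.reg .rsp).toNat⟩] u.mem s_10ccb7.mem := by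
      u_same
    have hk := kept_of_sameExcept hbits hsame0 (by
      intro w hw
      simp only [List.mem_cons, List.mem_nil_iff, or_false] at hw
      subst hw
      simp only []
      omega)
    have hun : ShadowUntouched u.mem s_10ccb7.mem := by v_untouched
    have hs1 : UInt64.ofNat (s_10ccb7.mem.readLE (u.reg .rsp - 8) 8) = u.reg .r14 := by u_resolve
    have hs2 : UInt64.ofNat (s_10ccb7.mem.readLE (u.reg .rsp - 16) 8) = u.reg .r13 := by u_resolve
    have hs3 : UInt64.ofNat (s_10ccb7.mem.readLE (u.reg .rsp - 24) 8) = u.reg .r12 := by u_resolve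
    have hs4 : UInt64.ofNat (s_10ccb7.mem.readLE (u.reg .rsp - 32) 8) = u.reg .rbp := by u_resolve
    have hs5 : UInt64.ofNat (s_10ccb7.mem.readLE (u.reg .rsp - 40) 8) = u.reg .rbx := by u_resolve
    have hs0 : UInt64.ofNat (s_10ccb7.mem.readLE (u.reg .rsp) 8) = ret := by u_resolve
    have hdf : s_10ccb7.flags .df = false := by
      rw [w_flags]
      simp only [X86.User.df_setStatus]
      exact w_df_10ccab
    have hmx : s_10ccb7.mxcsr &&& 0x1F80 = 0x1F80 := by
      rw [w_mxcsr]
      exact he_mx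
    have hlast : stb_vorbis.last_seg u.mem f = 0 := by
      rw [hls_u]
      omega
    have hne : stb_vorbis.next_seg s_10ccb7.mem f ≠ -1 := by
      rw [hk.2.2.1, hns_u]
      omega
    exact Vorbis.Spec.Worked.next_segment.segment_read_w Lay hLay μ hμ u₀ hcode hload4 hload1 hstore4 hstore1 others frames Blk len u s_10ccb7 ret f hpre hf
      he_ret_lt he_stack he_room hlast (w_rip.trans (by rfl)) w_rbx w_rsp (w_kept.mono_all (by rfl)) hsame hun hs1 hs2 hs3 hs4
      hs5 hs0 w_eq hdf hmx hk.1 hne (Nat.le_of_eq hk.2.1)
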